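/- GENERATED by farm/mkstatement.py from design/units.tsv (unit `DGifGetImageDesc.E`) and the assertions of Gif/Spec/Seg_DGifGetImageDesc.lean — do not edit.
   THE STATEMENT of the proof unit `DGifGetImageDesc.E`: segment E of `DGifGetImageDesc` (7 instructions; entries 0x10949a;
   exits ret; ranges 0x10949a-0x1094a7)
   takes each of its entry assertions to one of its exit assertions (`Gif.Spec.DGifGetImageDesc.SegE`), given the contracts of its callees.
   What the names mean: ProgX/Base/Spec/Basic.lean (the shared hypotheses), Gif/Spec/Seg_DGifGetImageDesc.lean (the assertions). The theorem to prove: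
   `theorem DGifGetImageDesc_E_ok : Gif.Spec.DGifGetImageDesc_E.Statement`. -/
import Gif.Code
import Gif.Dec.All
import Gif.Labels
import Gif.Spec.Seg_DGifGetImageDesc
namespace Gif.Spec.DGifGetImageDesc_E
open X86 X86.User Asan

/-- The statement of unit `DGifGetImageDesc.E`. -/
def Statement : Prop :=
  ∀ (Lay : Layout) (_hLay : Lay.hi = 0x1000000) (μ : Microarch) (_hμ : UserX.MicroOK μ) (u₀ : State)
    (_hcode : HasCodeNat Lay u₀ Gif.L.DGifGetImageDesc.entry Gif.Code.code_DGifGetImageDesc.nat Gif.L.DGifGetImageDesc.size),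
    Gif.Spec.DGifGetImageDesc.SegE Lay μ u₀

end Gif.Spec.DGifGetImageDesc_E
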